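-- pv_equiv track=rewrite | github.com/namburikrishnaganesh/CSA5121-Cryptography | EXP - 22.py | f
-- ===== SOURCE A (Python) =====
-- EP = [3, 0, 1, 2, 1, 2, 3, 0]
--
-- P4 = [1, 3, 2, 0]
--
-- S0 = [
--     [1, 0, 3, 2],
--     [3, 2, 1, 0],
--     [0, 2, 1, 3],
--     [3, 1, 3, 2]
-- ]
--
-- S1 = [
--     [0, 1, 2, 3],
--     [2, 0, 1, 3],
--     [3, 0, 1, 0],
--     [2, 1, 0, 3]
-- ]
--
-- def sbox(val, box):
--     row = ((val & 0x8) >> 2) | (val & 0x1)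
--     col = (val >> 1) & 0x3
--     return box[row][col]
--
-- def f(r, sk):
--     # Expand and permute
--     ep = 0
--     for i in range(8):
--         ep <<= 1
--         ep |= (r >> (3 - EP[i])) & 1
--     x = ep ^ sk
--     left = (x >> 4) & 0xF
--     right = x & 0xF
--     out = (sbox(left, S0) << 2) | sbox(right, S1)
--     # P4 permutation
--     p4out = 0
--     for i in range(4):
--         p4out <<= 1
--         p4out |= (out >> (3 - P4[i])) & 1
--     return p4out
-- ===== SOURCE B (Python) =====
-- # S-DES round function via two precomputed lookup tables:
-- # EPT[r & 15] is the EP expansion of the low nibble of r, and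
-- # FT[x] = P4(S0(x>>4) || S1(x&15)) for every 8-bit x.
-- # (Tables are fixed constants of the cipher, written out once.)
--
-- EPT = [0, 130, 20, 150, 40, 170, 60, 190, 65, 195, 85, 215, 105, 235, 125, 255]
--
-- FT = [8, 10, 12, 8, 10, 12, 14, 14, 14, 10, 8, 12, 12, 8, 8, 14,
--       9, 11, 13, 9, 11, 13, 15, 15, 15, 11, 9, 13, 13, 9, 9, 15,
--       0, 2, 4, 0, 2, 4, 6, 6, 6, 2, 0, 4, 4, 0, 0, 6,
--       1, 3, 5, 1, 3, 5, 7, 7, 7, 3, 1, 5, 5, 1, 1, 7,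
--       9, 11, 13, 9, 11, 13, 15, 15, 15, 11, 9, 13, 13, 9, 9, 15,
--       8, 10, 12, 8, 10, 12, 14, 14, 14, 10, 8, 12, 12, 8, 8, 14,
--       1, 3, 5, 1, 3, 5, 7, 7, 7, 3, 1, 5, 5, 1, 1, 7,
--       0, 2, 4, 0, 2, 4, 6, 6, 6, 2, 0, 4, 4, 0, 0, 6,
--       0, 2, 4, 0, 2, 4, 6, 6, 6, 2, 0, 4, 4, 0, 0, 6,
--       9, 11, 13, 9, 11, 13, 15, 15, 15, 11, 9, 13, 13, 9, 9, 15,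
--       1, 3, 5, 1, 3, 5, 7, 7, 7, 3, 1, 5, 5, 1, 1, 7,
--       8, 10, 12, 8, 10, 12, 14, 14, 14, 10, 8, 12, 12, 8, 8, 14,
--       8, 10, 12, 8, 10, 12, 14, 14, 14, 10, 8, 12, 12, 8, 8, 14,
--       9, 11, 13, 9, 11, 13, 15, 15, 15, 11, 9, 13, 13, 9, 9, 15,
--       9, 11, 13, 9, 11, 13, 15, 15, 15, 11, 9, 13, 13, 9, 9, 15,
--       1, 3, 5, 1, 3, 5, 7, 7, 7, 3, 1, 5, 5, 1, 1, 7]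
--
--
-- def f(r, sk):
--     return FT[(EPT[r & 0xF] ^ sk) & 0xFF]
-- ===== Notes on version B (the rewrite author's own statement) =====
-- stated objective: alternative
-- what changed: Replaces A's per-call EP loop, S-box row/column logic and P4 loop with two precomputed constant lookup tables: EPT (16 entries, the EP expansion of each nibble) and FT (256 entries, the full P4-after-S-boxes map of an 8-bit value), so f is just FT[(EPT[r & 15] ^ sk) & 255].
import Mathlib
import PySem

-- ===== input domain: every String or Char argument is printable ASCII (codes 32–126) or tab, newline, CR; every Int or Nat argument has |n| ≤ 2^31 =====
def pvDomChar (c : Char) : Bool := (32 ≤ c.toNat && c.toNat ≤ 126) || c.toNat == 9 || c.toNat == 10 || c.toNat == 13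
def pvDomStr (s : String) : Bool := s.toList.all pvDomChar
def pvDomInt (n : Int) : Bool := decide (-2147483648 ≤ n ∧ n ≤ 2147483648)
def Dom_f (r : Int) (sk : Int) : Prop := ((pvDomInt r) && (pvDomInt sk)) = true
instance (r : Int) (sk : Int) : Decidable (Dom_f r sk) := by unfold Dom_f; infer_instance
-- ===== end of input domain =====

-- B replaces A's EP loop, S-box logic and P4 loop by two precomputed constant lookup tables (16-entry EPT, 256-entry FT); same O(1) cost, a different mechanism.

-- ===== PORT A =====
def EP : List Int := [3, 0, 1, 2, 1, 2, 3, 0]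

def P4 : List Int := [1, 3, 2, 0]

def S0 : List (List Int) := [[1, 0, 3, 2], [3, 2, 1, 0], [0, 2, 1, 3], [3, 1, 3, 2]]

def S1 : List (List Int) := [[0, 1, 2, 3], [2, 0, 1, 3], [3, 0, 1, 0], [2, 1, 0, 3]]

-- box[row][col]: row and col are always in 0..3 here (both built by masking), so the pyGetD defaults are never used
def sbox (val : Int) (box : List (List Int)) : Int :=
  let row := PySem.Int.bor ((PySem.Int.band val 8) >>> (2:Nat)) (PySem.Int.band val 1)
  let col := PySem.Int.band (val >>> (1:Nat)) 3
  PySem.List.pyGetD (PySem.List.pyGetD box row []) col 0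

def f (r : Int) (sk : Int) : Int :=
  let ep := (PySem.List.pyRange 0 8 1).foldl
    (fun ep i =>
      PySem.Int.bor (ep <<< (1:Nat))
        (PySem.Int.band (r >>> (3 - PySem.List.pyGetD EP i 0).toNat) 1)) 0
  let x := PySem.Int.bxor ep sk
  let left := PySem.Int.band (x >>> (4:Nat)) 15
  let right := PySem.Int.band x 15
  let out := PySem.Int.bor (sbox left S0 <<< (2:Nat)) (sbox right S1)
  (PySem.List.pyRange 0 4 1).foldl
    (fun p4out i =>
      PySem.Int.bor (p4out <<< (1:Nat))
        (PySem.Int.band (out >>> (3 - PySem.List.pyGetD P4 i 0).toNat) 1)) 0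

-- ===== PORT B =====
def EPT : List Int := [0, 130, 20, 150, 40, 170, 60, 190, 65, 195, 85, 215, 105, 235, 125, 255]

def FT : List Int :=
  [8, 10, 12, 8, 10, 12, 14, 14, 14, 10, 8, 12, 12, 8, 8, 14,
   9, 11, 13, 9, 11, 13, 15, 15, 15, 11, 9, 13, 13, 9, 9, 15,
   0, 2, 4, 0, 2, 4, 6, 6, 6, 2, 0, 4, 4, 0, 0, 6,
   1, 3, 5, 1, 3, 5, 7, 7, 7, 3, 1, 5, 5, 1, 1, 7,
   9, 11, 13, 9, 11, 13, 15, 15, 15, 11, 9, 13, 13, 9, 9, 15,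
   8, 10, 12, 8, 10, 12, 14, 14, 14, 10, 8, 12, 12, 8, 8, 14,
   1, 3, 5, 1, 3, 5, 7, 7, 7, 3, 1, 5, 5, 1, 1, 7,
   0, 2, 4, 0, 2, 4, 6, 6, 6, 2, 0, 4, 4, 0, 0, 6,
   0, 2, 4, 0, 2, 4, 6, 6, 6, 2, 0, 4, 4, 0, 0, 6,
   9, 11, 13, 9, 11, 13, 15, 15, 15, 11, 9, 13, 13, 9, 9, 15,
   1, 3, 5, 1, 3, 5, 7, 7, 7, 3, 1, 5, 5, 1, 1, 7,
   8, 10, 12, 8, 10, 12, 14, 14, 14, 10, 8, 12, 12, 8, 8, 14,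
   8, 10, 12, 8, 10, 12, 14, 14, 14, 10, 8, 12, 12, 8, 8, 14,
   9, 11, 13, 9, 11, 13, 15, 15, 15, 11, 9, 13, 13, 9, 9, 15,
   9, 11, 13, 9, 11, 13, 15, 15, 15, 11, 9, 13, 13, 9, 9, 15,
   1, 3, 5, 1, 3, 5, 7, 7, 7, 3, 1, 5, 5, 1, 1, 7]

-- indices are masked to 0..15 / 0..255 so the pyGetD defaults are never used
def f_alt (r : Int) (sk : Int) : Int :=
  PySem.List.pyGetD FT
    (PySem.Int.band (PySem.Int.bxor (PySem.List.pyGetD EPT (PySem.Int.band r 15) 0) sk) 255) 0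

-- ===== PRECONDITION & SPEC =====
def Spec_f (r : Int) (sk : Int) (out : Int) : Prop := out = f_alt r sk
instance (r : Int) (sk : Int) (out : Int) : Decidable (Spec_f r sk out) := by unfold Spec_f; infer_instance

-- ===== CLAIM (what is proved, stated in full; the proofs are below) =====
def Claim_equal_f : Prop := ∀ (r : Int) (sk : Int), Dom_f r sk → Spec_f r sk (f r sk)

-- ===== LEMMAS AND PROOFS =====

-- A's ep loop, written as a closed formula over the four low bits of r (proof helper only)
def epA (r : Int) : Int :=
  let b0 := PySem.Int.band r 1
  let b1 := PySem.Int.band (r >>> (1:Nat)) 1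
  let b2 := PySem.Int.band (r >>> (2:Nat)) 1
  let b3 := PySem.Int.band (r >>> (3:Nat)) 1
  PySem.Int.bor (b0 <<< (7:Nat)) (PySem.Int.bor (b3 <<< (6:Nat)) (PySem.Int.bor (b2 <<< (5:Nat))
    (PySem.Int.bor (b1 <<< (4:Nat)) (PySem.Int.bor (b2 <<< (3:Nat)) (PySem.Int.bor (b1 <<< (2:Nat))
    (PySem.Int.bor (b0 <<< (1:Nat)) b3))))))

-- A's S-box/P4 tail of f, as a function of x = ep ^ sk (proof helper only)
def tailA (x : Int) : Int :=
  let left := PySem.Int.band (x >>> (4:Nat)) 15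
  let right := PySem.Int.band x 15
  let out := PySem.Int.bor (sbox left S0 <<< (2:Nat)) (sbox right S1)
  (PySem.List.pyRange 0 4 1).foldl
    (fun p4out i =>
      PySem.Int.bor (p4out <<< (1:Nat))
        (PySem.Int.band (out >>> (3 - PySem.List.pyGetD P4 i 0).toNat) 1)) 0

lemma bit01 (x : Int) : PySem.Int.band x 1 = 0 ∨ PySem.Int.band x 1 = 1 := by
  rw [PySem.Int.band_one]; exact PySem.Int.mod_two_eq x

-- A's EP loop equals the closed formula epA (case split on the four low bits of r)
lemma ep_loop_eq (r : Int) :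
    (PySem.List.pyRange 0 8 1).foldl
      (fun ep i =>
        PySem.Int.bor (ep <<< (1:Nat))
          (PySem.Int.band (r >>> (3 - PySem.List.pyGetD EP i 0).toNat) 1)) 0 = epA r := by
  have h0 := bit01 r
  have h1 := bit01 (r >>> (1:Nat))
  have h2 := bit01 (r >>> (2:Nat))
  have h3 := bit01 (r >>> (3:Nat))
  simp only [show PySem.List.pyRange 0 8 1 = [0,1,2,3,4,5,6,7] from by decide, List.foldl,
    show PySem.List.pyGetD EP 0 0 = 3 from by decide,
    show PySem.List.pyGetD EP 1 0 = 0 from by decide,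
    show PySem.List.pyGetD EP 2 0 = 1 from by decide,
    show PySem.List.pyGetD EP 3 0 = 2 from by decide,
    show PySem.List.pyGetD EP 4 0 = 1 from by decide,
    show PySem.List.pyGetD EP 5 0 = 2 from by decide,
    show PySem.List.pyGetD EP 6 0 = 3 from by decide,
    show PySem.List.pyGetD EP 7 0 = 0 from by decide,
    show ((3 - 3 : Int)).toNat = 0 from rfl,
    show ((3 - 0 : Int)).toNat = 3 from rfl,
    show ((3 - 1 : Int)).toNat = 2 from rfl,
    show ((3 - 2 : Int)).toNat = 1 from rfl,
    Int.shiftRight_zero, epA]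
  rcases h0 with h0|h0 <;> rcases h1 with h1|h1 <;> rcases h2 with h2|h2 <;> rcases h3 with h3|h3 <;>
    simp only [h0, h1, h2, h3] <;> decide

-- epA depends only on r mod 16
lemma epA_mod (r : Int) : epA r = epA (r % 16) := by
  unfold epA
  simp only [PySem.Int.band_one, Int.shiftRight_eq_div_pow]
  norm_num
  rw [show r % 2 = (r % 16) % 2 from by omega,
      show r / 2 % 2 = (r % 16) / 2 % 2 from by omega,
      show r / 4 % 2 = (r % 16) / 4 % 2 from by omega,
      show r / 8 % 2 = (r % 16) / 8 % 2 from by omega]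

lemma f_red (r sk : Int) : f r sk = tailA (PySem.Int.bxor (epA r) sk) := by
  simp only [f, tailA, ep_loop_eq]

lemma band_15 (x : Int) : PySem.Int.band x 15 = x % 16 := by
  unfold PySem.Int.band
  by_cases hx : 0 ≤ x <;>
    simp only [hx, if_true, if_false, show (0:Int) ≤ 15 by norm_num, show ((15:Int)).toNat = 15 from rfl] <;>
    [skip; rw [Nat.land_comm]] <;>
    rw [show (15:Nat) = 2^4 - 1 from rfl, Nat.and_two_pow_sub_one_eq_mod] <;> omega

lemma band_255 (x : Int) : PySem.Int.band x 255 = x % 256 := by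
  unfold PySem.Int.band
  by_cases hx : 0 ≤ x <;>
    simp only [hx, if_true, if_false, show (0:Int) ≤ 255 by norm_num, show ((255:Int)).toNat = 255 from rfl] <;>
    [skip; rw [Nat.land_comm]] <;>
    rw [show (255:Nat) = 2^8 - 1 from rfl, Nat.and_two_pow_sub_one_eq_mod] <;> omega

-- the EPT table agrees with epA on 0..15
lemma EPT_eq (t : Int) (h1 : 0 ≤ t) (h2 : t < 16) : PySem.List.pyGetD EPT t 0 = epA t := by
  interval_cases t <;> decide

-- the FT table agrees with A's S-box/P4 tail
set_option maxHeartbeats 4000000 in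
set_option maxRecDepth 4096 in
lemma tail_table (x : Int) : tailA x = PySem.List.pyGetD FT (PySem.Int.band x 255) 0 := by
  have hA : tailA x = tailA (x % 256) := by
    unfold tailA
    simp only [band_15,
      show x >>> (4:Nat) = x / 16 from by rw [Int.shiftRight_eq_div_pow]; norm_num,
      show (x % 256) >>> (4:Nat) = (x % 256) / 16 from by rw [Int.shiftRight_eq_div_pow]; norm_num,
      show (x / 16) % 16 = ((x % 256) / 16) % 16 from by omega,
      show x % 16 = (x % 256) % 16 from by omega]
  rw [hA, band_255]
  have hs : 0 ≤ x % 256 ∧ x % 256 < 256 := by omega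
  generalize x % 256 = s at hs ⊢
  obtain ⟨h1, h2⟩ := hs
  interval_cases s <;> decide

-- ===== VERDICT (by name: the statement is the Claim_ definition above) =====
theorem f_spec : Claim_equal_f := by
  intro r sk _
  unfold Spec_f f_alt
  rw [f_red, epA_mod, band_15, EPT_eq (r % 16) (by omega) (by omega), tail_table]
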